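-- pv_equiv track=rewrite | github.com/thiviyanT/IntelliGraphs | intelligraphs/data_loaders/utils.py | parse_subgraphs
-- ===== SOURCE A (Python) =====
-- from typing import List, Dict, Tuple, Union
--
-- def parse_subgraphs(lists: List[List[str]]) -> List[List[List[str]]]:
--     """
--     Split a list of lists into subgraphs based on empty lists as separators.
--
--     Args:
--         lists: List of lists, where each inner list contains strings. Empty lists are used as separators.
--     Returns:
--         A list of subgraphs, where each subgraph is a list of lists of strings.
--     """
--     subgraphs = []
--     current_subgraph = []
--
--     for inner_list in lists:
--         if inner_list != ['']:
--             current_subgraph.append(inner_list)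
--         else:
--             if current_subgraph:  # Only append non-empty subgraphs
--                 subgraphs.append(current_subgraph)
--             current_subgraph = []
--
--     # Add the last subgraph if it's not empty
--     if current_subgraph:
--         subgraphs.append(current_subgraph)
--
--     return subgraphs
-- ===== SOURCE B (Python) =====
-- from itertools import groupby
--
-- def parse_subgraphs(lists):
--     return [list(g) for k, g in groupby(lists, key=lambda x: x == ['']) if not k]
-- ===== Notes on version B (the rewrite author's own statement) =====
-- stated objective: idiomatic
-- what changed: Replaces the manual accumulator loop (current_subgraph/subgraphs with reset-on-separator) by itertools.groupby over runs keyed on x == [''], keeping only the non-separator runs.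
import Mathlib
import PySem

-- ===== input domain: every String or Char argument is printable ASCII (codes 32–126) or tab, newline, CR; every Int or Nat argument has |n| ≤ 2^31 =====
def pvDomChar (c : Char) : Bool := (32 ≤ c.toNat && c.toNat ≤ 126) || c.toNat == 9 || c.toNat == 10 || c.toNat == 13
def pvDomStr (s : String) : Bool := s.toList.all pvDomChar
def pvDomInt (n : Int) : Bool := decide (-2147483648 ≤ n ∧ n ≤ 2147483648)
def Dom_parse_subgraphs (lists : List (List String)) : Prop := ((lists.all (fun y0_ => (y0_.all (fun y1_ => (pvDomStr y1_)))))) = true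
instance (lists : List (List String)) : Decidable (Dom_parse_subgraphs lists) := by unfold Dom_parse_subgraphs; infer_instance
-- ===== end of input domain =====

-- B replaces A's manual accumulator loop (current/result with reset on separator)
-- by a groupby-style split into maximal runs, keeping the non-separator runs (idiomatic).

-- ===== PORT A =====
-- the loop of A, state = (subgraphs, current_subgraph), one step per inner_list
def parse_subgraphs_go (subgraphs : List (List (List String)))
    (current : List (List String)) : List (List String) → List (List (List String))
  | [] => if current ≠ [] then subgraphs ++ [current] else subgraphs
  | inner :: rest =>
    if inner ≠ [""] then
      parse_subgraphs_go subgraphs (current ++ [inner]) rest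
    else
      if current ≠ [] then parse_subgraphs_go (subgraphs ++ [current]) [] rest
      else parse_subgraphs_go subgraphs [] rest

def parse_subgraphs (lists : List (List String)) : List (List (List String)) :=
  parse_subgraphs_go [] [] lists

-- ===== PORT B =====
-- groupby: take the maximal run sharing the key (x == ['']) of the head; keep it iff key is false
def parse_subgraphs_alt (lists : List (List String)) : List (List (List String)) :=
  match lists with
  | [] => []
  | x :: xs =>
    let k := x == [""]
    let rest := xs.dropWhile (fun y => (y == [""]) == k)
    if k then parse_subgraphs_alt rest
    else (x :: xs.takeWhile (fun y => (y == [""]) == k)) :: parse_subgraphs_alt rest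
termination_by lists.length
decreasing_by
  all_goals
    simp only [List.length_cons]
    exact Nat.lt_succ_of_le (List.length_dropWhile_le _ _)

-- ===== PRECONDITION & SPEC =====
def Spec_parse_subgraphs (lists : List (List String)) (out : List (List (List String))) : Prop := out = parse_subgraphs_alt lists
instance (lists : List (List String)) (out : List (List (List String))) : Decidable (Spec_parse_subgraphs lists out) := by unfold Spec_parse_subgraphs; infer_instance

-- ===== CLAIM (what is proved, stated in full; the proofs are below) =====
def Claim_equal_parse_subgraphs : Prop := ∀ (lists : List (List String)), Dom_parse_subgraphs lists → Spec_parse_subgraphs lists (parse_subgraphs lists)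

-- ===== LEMMAS AND PROOFS =====

-- the result list accumulator factors out
theorem go_append (l : List (List String)) :
    ∀ subs cur, parse_subgraphs_go subs cur l = subs ++ parse_subgraphs_go [] cur l := by
  induction l with
  | nil =>
    intro subs cur
    simp only [parse_subgraphs_go]
    split_ifs <;> simp
  | cons x xs ih =>
    intro subs cur
    simp only [parse_subgraphs_go]
    split_ifs with h1 h2
    · exact ih subs (cur ++ [x])
    · rw [ih (subs ++ [cur]) [], ih ([] ++ [cur]) []]
      simp
    · exact ih subs []

-- skipping one leading separator does not change B's result
theorem alt_sep (xs : List (List String)) :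
    parse_subgraphs_alt ([""] :: xs) = parse_subgraphs_alt xs := by
  rw [parse_subgraphs_alt]
  simp only [BEq.rfl, if_pos]
  cases xs with
  | nil => simp [parse_subgraphs_alt]
  | cons y ys =>
    by_cases hy : y = [""]
    · subst hy
      rw [List.dropWhile_cons_of_pos (by simp)]
      conv_rhs => rw [parse_subgraphs_alt]
      simp
    · rw [List.dropWhile_cons_of_neg (by simp [hy])]

-- main invariant: the loop with empty pending run equals B, and with a nonempty
-- pending run cur it emits cur extended by the leading non-separator run, then continues as B
theorem go_alt (l : List (List String)) :
    (parse_subgraphs_go [] [] l = parse_subgraphs_alt l) ∧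
    (∀ cur, cur ≠ [] →
      parse_subgraphs_go [] cur l =
        (cur ++ l.takeWhile (fun y => (y == [""]) == false)) ::
          parse_subgraphs_alt (l.dropWhile (fun y => (y == [""]) == false))) := by
  induction l with
  | nil =>
    constructor
    · simp [parse_subgraphs_go, parse_subgraphs_alt]
    · intro cur hcur
      simp [parse_subgraphs_go, parse_subgraphs_alt, hcur]
  | cons x xs ih =>
    by_cases hx : x = [""]
    · subst hx
      constructor
      · have h1 : parse_subgraphs_go [] [] ([""] :: xs) = parse_subgraphs_go [] [] xs := by
          simp [parse_subgraphs_go]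
        rw [h1, ih.1, alt_sep]
      · intro cur hcur
        have h1 : parse_subgraphs_go [] cur ([""] :: xs) = parse_subgraphs_go [cur] [] xs := by
          simp [parse_subgraphs_go, hcur]
        rw [h1, go_append, ih.1,
          List.takeWhile_cons_of_neg (by decide), List.dropWhile_cons_of_neg (by decide),
          alt_sep]
        simp
    · have hb : (x == [""]) = false := by simp [hx]
      constructor
      · have h1 : parse_subgraphs_go [] [] (x :: xs) = parse_subgraphs_go [] [x] xs := by
          simp [parse_subgraphs_go, hx]
        rw [h1, ih.2 [x] (by simp)]
        conv_rhs => rw [parse_subgraphs_alt]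
        simp [hb]
      · intro cur hcur
        have h1 : parse_subgraphs_go [] cur (x :: xs) = parse_subgraphs_go [] (cur ++ [x]) xs := by
          simp [parse_subgraphs_go, hx]
        rw [h1, ih.2 (cur ++ [x]) (by simp),
          List.takeWhile_cons_of_pos (by simp [hb]), List.dropWhile_cons_of_pos (by simp [hb])]
        simp

-- ===== VERDICT (by name: the statement is the Claim_ definition above) =====
theorem parse_subgraphs_spec : Claim_equal_parse_subgraphs := by
  intro lists _
  unfold Spec_parse_subgraphs parse_subgraphs
  exact (go_alt lists).1
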